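-- pv_equiv track=rewrite | github.com/ShajahanAI/codewars | python/7 kyu/181.py | yoga
-- ===== SOURCE A (Python) =====
-- def yoga(classroom, poses):
--     skilled_people = 0
--     for row in classroom:
--         row_skill = sum(row)
--         for individual_skill in row:
--             total_skill = row_skill + individual_skill
--             for skill_required in poses:
--                 if total_skill >= skill_required:
--                     skilled_people += 1
--
--     return skilled_people
-- ===== SOURCE B (Python) =====
-- def yoga(classroom, poses):
--     totals = []
--     for row in classroom:
--         s = sum(row)
--         totals.extend(s + x for x in row)
--     totals.sort()
--     sp = sorted(poses)
--     j = 0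
--     res = 0
--     for t in totals:
--         while j < len(sp) and sp[j] <= t:
--             j += 1
--         res += j
--     return res
-- ===== Notes on version B (the rewrite author's own statement) =====
-- stated objective: faster
-- what changed: Instead of a triple nested loop, B flattens all person totals into one list, sorts it together with the poses, and counts all qualifying (person, pose) pairs in a single merge-style two-pointer pass.
import Mathlib
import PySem

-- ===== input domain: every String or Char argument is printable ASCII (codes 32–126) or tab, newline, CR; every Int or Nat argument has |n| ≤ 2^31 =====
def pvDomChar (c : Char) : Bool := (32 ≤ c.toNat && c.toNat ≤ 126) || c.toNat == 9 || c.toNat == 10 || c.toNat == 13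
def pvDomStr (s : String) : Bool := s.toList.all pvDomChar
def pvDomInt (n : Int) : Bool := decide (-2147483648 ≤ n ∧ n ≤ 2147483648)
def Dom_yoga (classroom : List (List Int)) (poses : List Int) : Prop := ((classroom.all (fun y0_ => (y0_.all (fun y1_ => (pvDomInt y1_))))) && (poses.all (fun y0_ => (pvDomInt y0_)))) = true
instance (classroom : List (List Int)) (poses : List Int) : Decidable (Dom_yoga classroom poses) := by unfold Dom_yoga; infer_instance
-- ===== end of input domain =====

-- B flattens all person totals, sorts them together with the poses, and counts all pairs in one merge-style two-pointer pass; measurably faster on large inputs.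

-- ===== PORT A =====
def yoga (classroom : List (List Int)) (poses : List Int) : Int :=
  classroom.foldl (fun skilled row =>
    let rowSkill := row.foldl (· + ·) 0
    row.foldl (fun acc x =>
      poses.foldl (fun a p => if rowSkill + x ≥ p then a + 1 else a) acc) skilled) 0

-- ===== PORT B =====
-- the 'while j < len(sp) and sp[j] <= t' loop of Source B, as a recursion on the index j
def pvAdvance (sp : List Int) (t : Int) (j : Nat) : Nat :=
  if h : j < sp.length then
    if sp[j] ≤ t then pvAdvance sp t (j + 1) else j
  else j
termination_by sp.length - j

def yoga_alt (classroom : List (List Int)) (poses : List Int) : Int :=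
  let totals := classroom.foldl (fun acc row =>
    let s := row.foldl (· + ·) 0
    acc ++ row.map (fun x => s + x)) []
  let totalsSorted := PySem.List.sorted totals (fun y => y) false
  let sp := PySem.List.sorted poses (fun y => y) false
  (totalsSorted.foldl (fun st t =>
      let j := pvAdvance sp t st.1
      (j, st.2 + (j : Int))) ((0 : Nat), (0 : Int))).2

-- ===== PRECONDITION & SPEC =====
def Spec_yoga (classroom : List (List Int)) (poses : List Int) (out : Int) : Prop := out = yoga_alt classroom poses
instance (classroom : List (List Int)) (poses : List Int) (out : Int) : Decidable (Spec_yoga classroom poses out) := by unfold Spec_yoga; infer_instance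

-- ===== CLAIM (what is proved, stated in full; the proofs are below) =====
def Claim_equal_yoga : Prop := ∀ (classroom : List (List Int)) (poses : List Int), Dom_yoga classroom poses → Spec_yoga classroom poses (yoga classroom poses)

-- ===== LEMMAS AND PROOFS =====

-- countP equals k when the predicate holds exactly on indices < k
theorem pv_countP_index_split (xs : List Int) (p : Int → Bool) (k : Nat)
    (hk : k ≤ xs.length)
    (h1 : ∀ j (hj : j < xs.length), j < k → p xs[j])
    (h2 : ∀ j (hj : j < xs.length), k ≤ j → ¬ p xs[j]) :
    xs.countP p = k := by
  induction xs generalizing k with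
  | nil => simp at hk; simp [hk]
  | cons a xs ih =>
    cases k with
    | zero =>
      have ha : ¬ p a := h2 0 (by simp) (Nat.zero_le _)
      have : xs.countP p = 0 := by
        apply ih 0 (Nat.zero_le _)
        · intro j hj hj0; omega
        · intro j hj _
          have := h2 (j+1) (by simpa using Nat.succ_lt_succ hj) (Nat.zero_le _)
          simpa using this
      simp [this, ha]
    | succ m =>
      have ha : p a := h1 0 (by simp) (Nat.succ_pos _)
      have hxs : xs.countP p = m := by
        apply ih m (by simpa using hk)
        · intro j hj hjm
          have := h1 (j+1) (by simpa using Nat.succ_lt_succ hj) (Nat.succ_lt_succ hjm)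
          simpa using this
        · intro j hj hmj
          have := h2 (j+1) (by simpa using Nat.succ_lt_succ hj) (Nat.succ_le_succ hmj)
          simpa using this
      simp [hxs, ha]

-- bisectRight on the sorted list counts the poses ≤ t (of the original list)
theorem pv_bisect_eq_countP (poses : List Int) (t : Int) :
    PySem.List.bisectRight (PySem.List.sorted poses (fun x => x) false) t
      = poses.countP (fun p => decide (p ≤ t)) := by
  set sp := PySem.List.sorted poses (fun x => x) false with hsp
  have hsorted : sp.Pairwise (fun a b => a ≤ b) := by
    simpa using PySem.List.sorted_pairwise poses (fun x => x)
  obtain ⟨hk, hlt, hge⟩ := PySem.List.bisectRight_spec sp t hsorted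
  have hcount : sp.countP (fun p => decide (p ≤ t)) = PySem.List.bisectRight sp t := by
    apply pv_countP_index_split sp _ _ hk
    · intro j hj hjk; simpa using hlt j hj hjk
    · intro j hj hkj
      have := hge j hj hkj
      simp; omega
  have hperm : sp.Perm poses := PySem.List.sorted_perm poses (fun x => x) false
  rw [← hperm.countP_eq, hcount]

-- the while loop lands exactly at bisectRight when started at or below it
theorem pv_advance_eq (sp : List Int) (hs : sp.Pairwise (fun a b => a ≤ b)) (t : Int) (j : Nat)
    (hj : j ≤ PySem.List.bisectRight sp t) :
    pvAdvance sp t j = PySem.List.bisectRight sp t := by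
  obtain ⟨hk, hlt, hge⟩ := PySem.List.bisectRight_spec sp t hs
  set k := PySem.List.bisectRight sp t with hkdef
  induction hfuel : k - j generalizing j with
  | zero =>
    have hjk : j = k := by omega
    rw [pvAdvance]
    split
    · next h =>
      have hg := hge j h (by omega)
      have hle : ¬ sp[j] ≤ t := by omega
      rw [if_neg hle]
      exact hjk
    · exact hjk
  | succ n ih =>
    have hjk : j < k := by omega
    have hjl : j < sp.length := by omega
    have hle : sp[j] ≤ t := by simpa using hlt j hjl hjk
    rw [pvAdvance]
    simp only [hjl, dif_pos, hle, if_pos]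
    exact ih (j + 1) (by omega) (by omega)

-- one merge pass over the sorted totals sums countP for each total
theorem pv_fold_merge (poses : List Int) (ts : List Int) (hts : ts.Pairwise (fun a b => a ≤ b))
    (j : Nat) (res : Int)
    (hj : ∀ t ∈ ts, j ≤ poses.countP (fun p => decide (p ≤ t))) :
    (ts.foldl (fun st t =>
        let j' := pvAdvance (PySem.List.sorted poses (fun y => y) false) t st.1
        (j', st.2 + (j' : Int))) (j, res)).2
      = res + (ts.map (fun t => (poses.countP (fun p => decide (p ≤ t)) : Int))).sum := by
  induction ts generalizing j res with
  | nil => simp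
  | cons t ts ih =>
    have hsorted : (PySem.List.sorted poses (fun y => y) false).Pairwise (fun a b => a ≤ b) := by
      simpa using PySem.List.sorted_pairwise poses (fun y => y)
    have hadv : pvAdvance (PySem.List.sorted poses (fun y => y) false) t j
        = poses.countP (fun p => decide (p ≤ t)) := by
      rw [pv_advance_eq _ hsorted t j (by rw [pv_bisect_eq_countP]; exact hj t (by simp)),
        pv_bisect_eq_countP]
    simp only [List.foldl_cons, hadv]
    rw [ih (List.Pairwise.of_cons hts) _ _ ?_]
    · simp; ring
    · intro t' ht'
      have htt' : t ≤ t' := (List.pairwise_cons.mp hts).1 t' ht'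
      exact List.countP_mono_left (fun x _ hx => by simp at hx ⊢; omega)

-- A's innermost pose loop computes acc + (number of poses ≤ t)
theorem pv_inner_loop (poses : List Int) (t : Int) (acc : Int) :
    poses.foldl (fun a p => if t ≥ p then a + 1 else a) acc
      = acc + (poses.countP (fun p => decide (p ≤ t)) : Int) := by
  induction poses generalizing acc with
  | nil => simp
  | cons p ps ih =>
    simp only [List.foldl_cons, List.countP_cons, ih]
    by_cases h : p ≤ t
    · simp [ge_iff_le, h]; ring
    · simp [ge_iff_le, h]

-- A's middle loop over a row sums the per-person counts
theorem pv_row_sum (poses : List Int) (row : List Int) (rs : Int) (acc : Int) :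
    row.foldl (fun acc x =>
        poses.foldl (fun a p => if rs + x ≥ p then a + 1 else a) acc) acc
      = acc + ((row.map (fun x => rs + x)).map
          (fun t => (poses.countP (fun p => decide (p ≤ t)) : Int))).sum := by
  induction row generalizing acc with
  | nil => simp
  | cons x xs ih =>
    simp only [List.foldl_cons, List.map_cons, List.sum_cons]
    rw [pv_inner_loop, ih]
    ring

-- A equals the sum of countP over the flattened totals
theorem pv_A_sum (poses : List Int) (rows : List (List Int)) (acc : Int) :
    rows.foldl (fun skilled row =>
      row.foldl (fun acc x =>
        poses.foldl (fun a p => if row.foldl (· + ·) 0 + x ≥ p then a + 1 else a) acc) skilled) acc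
      = acc + ((rows.flatMap (fun row => row.map (fun x => row.foldl (· + ·) 0 + x))).map
          (fun t => (poses.countP (fun p => decide (p ≤ t)) : Int))).sum := by
  induction rows generalizing acc with
  | nil => simp
  | cons row rows ih =>
    simp only [List.foldl_cons, List.flatMap_cons, List.map_append, List.sum_append]
    rw [pv_row_sum, ih]
    ring

-- ===== VERDICT (by name: the statement is the Claim_ definition above) =====
theorem yoga_spec : Claim_equal_yoga := by
  intro classroom poses _
  show yoga classroom poses = yoga_alt classroom poses
  unfold yoga yoga_alt
  have hflat : classroom.foldl (fun acc row =>
      acc ++ row.map (fun x => row.foldl (· + ·) 0 + x)) ([] : List Int)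
      = classroom.flatMap (fun row => row.map (fun x => row.foldl (· + ·) 0 + x)) := by
    simpa using PySem.List.foldl_append_eq_flatMap
      (fun row => row.map (fun x => row.foldl (· + ·) 0 + x)) classroom ([] : List Int)
  simp only [hflat]
  set totals := classroom.flatMap (fun row => row.map (fun x => row.foldl (· + ·) 0 + x)) with htot
  have hts : (PySem.List.sorted totals (fun y => y) false).Pairwise (fun a b => a ≤ b) := by
    simpa using PySem.List.sorted_pairwise totals (fun y => y)
  rw [pv_fold_merge poses _ hts 0 0 (fun t _ => Nat.zero_le _)]
  have hperm : (PySem.List.sorted totals (fun y => y) false).Perm totals :=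
    PySem.List.sorted_perm totals (fun y => y) false
  rw [(hperm.map _).sum_eq, pv_A_sum]
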